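-- pv_equiv track=rewrite | github.com/emiliomunozai/fofe-benchmark | src/dataloaders.py | tokens_to_ids
-- ===== SOURCE A (Python) =====
-- from typing import List, Tuple, Dict
--
-- def tokens_to_ids(tokens: List[str], vocab: Dict[str, int], force_keep: List[str] = None) -> List[int]:
--     unk = vocab["<UNK>"]
--     force_keep = set(force_keep or [])
--
--     ids = []
--     for t in tokens:
--         if t in force_keep and t not in vocab:
--             # inject entity into vocab with new ID
--             vocab[t] = len(vocab)
--         ids.append(vocab.get(t, unk))
--     return ids
-- ===== SOURCE B (Python) =====
-- def tokens_to_ids(tokens, vocab, force_keep=None):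
--     # Arithmetic id assignment: collect the distinct forced tokens absent from the
--     # original vocab in first-appearance order, number them base, base+1, ... by
--     # enumeration (no growing dict drives the ids), look ids up in a split table
--     # (original vocab vs injection table), then batch-update vocab at the end
--     # (same final vocab state as the original's in-place growth).
--     unk = vocab["<UNK>"]
--     fk = set(force_keep or [])
--     new = []
--     seen = set()
--     for t in tokens:
--         if t in fk and t not in vocab and t not in seen:
--             seen.add(t)
--             new.append(t)
--     base = len(vocab)
--     inj = {t: base + i for i, t in enumerate(new)}
--     ids = [vocab[t] if t in vocab else inj.get(t, unk) for t in tokens]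
--     vocab.update(inj)
--     return ids
-- ===== Notes on version B (the rewrite author's own statement) =====
-- stated objective: alternative
-- what changed: Replaces A's growing-dict mechanism (id = len(vocab) read off the mutating dict inside the fused lookup loop) by arithmetic id assignment: collect the distinct forced unseen tokens in first-appearance order, number them base+i by enumeration into a separate injection table, map each token through a split lookup (original vocab, else injection table, else unk), and batch-update vocab at the end.
import Mathlib
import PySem

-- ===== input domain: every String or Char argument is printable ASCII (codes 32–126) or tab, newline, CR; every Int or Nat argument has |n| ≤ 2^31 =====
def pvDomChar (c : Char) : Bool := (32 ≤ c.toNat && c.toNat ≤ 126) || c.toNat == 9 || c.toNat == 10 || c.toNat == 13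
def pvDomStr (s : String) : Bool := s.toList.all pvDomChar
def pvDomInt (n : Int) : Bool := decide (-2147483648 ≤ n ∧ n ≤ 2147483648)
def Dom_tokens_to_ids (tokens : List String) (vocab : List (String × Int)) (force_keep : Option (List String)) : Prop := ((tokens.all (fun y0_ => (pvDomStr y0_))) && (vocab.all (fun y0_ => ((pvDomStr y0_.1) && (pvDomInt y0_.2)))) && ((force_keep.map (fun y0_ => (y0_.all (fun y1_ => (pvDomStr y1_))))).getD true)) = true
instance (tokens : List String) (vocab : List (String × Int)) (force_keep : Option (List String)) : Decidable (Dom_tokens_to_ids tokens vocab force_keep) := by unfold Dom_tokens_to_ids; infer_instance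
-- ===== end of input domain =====

-- B replaces A's growing-dict id mechanism (id read off len(vocab) inside the fused loop)
-- by arithmetic ids: collect the distinct forced unseen tokens, number them base+i by
-- enumeration into a separate injection table, map via split lookup. Equivalence proved
-- about the RETURN value; in Python both mutate vocab to the same final state (B in batch).

-- ===== PORT A =====
-- A's loop body: possibly inject t into the vocab (id = current len), then append vocab.get(t, unk).
def pvAStep (fk : PySem.Set String) (unk : Int)
    (s : PySem.Dict String Int × List Int) (t : String) : PySem.Dict String Int × List Int :=
  let d := if fk.contains t && !(s.1.contains t) then s.1.insert t (s.1.size : Int) else s.1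
  (d, s.2 ++ [d.getD t unk])

def tokens_to_ids (tokens : List String) (vocab : List (String × Int)) (force_keep : Option (List String)) : List Int :=
  let d := PySem.Dict.ofList vocab
  let unk := d.getD "<UNK>" 0    -- vocab["<UNK>"]; Pre_ excludes the KeyError case
  let fk := PySem.Set.ofList (force_keep.getD [])
  (tokens.foldl (pvAStep fk unk) (d, [])).2

-- ===== PORT B =====
-- B's collection body: record t (list `new` + set `seen`) if forced, absent from vocab, unseen.
def pvCollect (fk : PySem.Set String) (d : PySem.Dict String Int)
    (acc : List String × PySem.Set String) (t : String) : List String × PySem.Set String :=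
  if fk.contains t && !(d.contains t) && !(acc.2.contains t)
  then (acc.1 ++ [t], acc.2.add t) else acc

def tokens_to_ids_alt (tokens : List String) (vocab : List (String × Int)) (force_keep : Option (List String)) : List Int :=
  let d := PySem.Dict.ofList vocab
  let unk := d.getD "<UNK>" 0    -- vocab["<UNK>"]; Pre_ excludes the KeyError case
  let fk := PySem.Set.ofList (force_keep.getD [])
  let new := (tokens.foldl (pvCollect fk d) ([], PySem.Set.ofList [])).1
  let base := (d.size : Int)
  -- inj = {t: base + i for i, t in enumerate(new)}
  let inj := (PySem.List.enumerate new 0).foldl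
      (fun e p => e.insert p.2 (base + p.1)) PySem.Dict.empty
  tokens.map (fun t => if d.contains t then d.getD t unk else inj.getD t unk)

-- ===== PRECONDITION & SPEC =====
-- Python A raises KeyError on vocab["<UNK>"] when the key is absent (and so does B).
def Pre_tokens_to_ids (tokens : List String) (vocab : List (String × Int)) (force_keep : Option (List String)) : Prop :=
  "<UNK>" ∈ vocab.map Prod.fst
instance (tokens : List String) (vocab : List (String × Int)) (force_keep : Option (List String)) : Decidable (Pre_tokens_to_ids tokens vocab force_keep) := by unfold Pre_tokens_to_ids; infer_instance
def pvWitness_tokens_to_ids : List String × (List (String × Int)) × Option (List String) :=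
  (["a", "ent", "a"], [("<UNK>", 0), ("a", 1)], some ["ent"])

def Spec_tokens_to_ids (tokens : List String) (vocab : List (String × Int)) (force_keep : Option (List String)) (out : List Int) : Prop := out = tokens_to_ids_alt tokens vocab force_keep
instance (tokens : List String) (vocab : List (String × Int)) (force_keep : Option (List String)) (out : List Int) : Decidable (Spec_tokens_to_ids tokens vocab force_keep out) := by unfold Spec_tokens_to_ids; infer_instance

-- ===== CLAIM (what is proved, stated in full; the proofs are below) =====
def Claim_equal_tokens_to_ids : Prop := ∀ (tokens : List String) (vocab : List (String × Int)) (force_keep : Option (List String)), Dom_tokens_to_ids tokens vocab force_keep → Pre_tokens_to_ids tokens vocab force_keep → Spec_tokens_to_ids tokens vocab force_keep (tokens_to_ids tokens vocab force_keep)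

-- ===== LEMMAS AND PROOFS =====

-- Proof-side description of A's vocab growth: register fresh forced tokens one by one.
def pvBReg (fk : PySem.Set String) (d : PySem.Dict String Int) (t : String) : PySem.Dict String Int :=
  if fk.contains t && !(d.contains t) then d.insert t (d.size : Int) else d

-- The dict d extended with the tokens of acc, each getting the current size as id.
def pvExtend (d : PySem.Dict String Int) (acc : List String) : PySem.Dict String Int :=
  acc.foldl (fun e x => e.insert x (e.size : Int)) d

lemma pvExtend_nil (d : PySem.Dict String Int) : pvExtend d [] = d := rfl

lemma pvExtend_append (d : PySem.Dict String Int) (acc : List String) (t : String) :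
    pvExtend d (acc ++ [t]) = (pvExtend d acc).insert t ((pvExtend d acc).size : Int) := by
  unfold pvExtend; rw [List.foldl_append]; rfl

lemma pvContains_extend (d : PySem.Dict String Int) (acc : List String) (x : String) :
    (pvExtend d acc).contains x = (d.contains x || acc.contains x) := by
  induction acc using List.reverseRecOn with
  | nil => simp [pvExtend_nil]
  | append_singleton acc t ih =>
    rw [pvExtend_append, PySem.Dict.contains_insert, ih]
    by_cases h : x = t <;> simp [h]

-- Registrations never change the lookup of a token that is already present, or that is
-- not forced (only forced, absent tokens are ever inserted).
lemma pvReg_getD_frozen (fk : PySem.Set String) (unk : Int) :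
    ∀ (ts : List String) (d : PySem.Dict String Int) (t : String),
      (d.contains t = true ∨ fk.contains t = false) →
      (ts.foldl (pvBReg fk) d).getD t unk = d.getD t unk := by
  intro ts
  induction ts with
  | nil => intro d t _; rfl
  | cons s ts ih =>
    intro d t h
    simp only [List.foldl_cons]
    by_cases hc : (fk.contains s && !(d.contains s)) = true
    · have hcs : fk.contains s = true ∧ d.contains s = false := by
        constructor
        · exact (Bool.and_eq_true _ _ |>.mp hc).1
        · simpa using (Bool.and_eq_true _ _ |>.mp hc).2
      have hB : pvBReg fk d s = d.insert s (d.size : Int) := by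
        unfold pvBReg; rw [if_pos hc]
      have hne : t ≠ s := by
        rcases h with h | h
        · intro he; subst he; rw [h] at hcs; exact absurd hcs.2 (by simp)
        · intro he; subst he; rw [h] at hcs; exact absurd hcs.1 (by simp)
      rw [hB, ih (d.insert s (d.size : Int)) t]
      · exact PySem.Dict.getD_insert_of_ne _ _ _ hne
      · rcases h with h | h
        · left; rw [PySem.Dict.contains_insert]; simp [h]
        · right; exact h
    · have hB : pvBReg fk d s = d := by
        unfold pvBReg; rw [if_neg hc]
      rw [hB]
      exact ih d t h

-- A's fused loop equals the map over the fully-registered vocab, for any accumulator.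
lemma pvLoop_eq (fk : PySem.Set String) (unk : Int) :
    ∀ (ts : List String) (d : PySem.Dict String Int) (acc : List Int),
      (ts.foldl (pvAStep fk unk) (d, acc)).2
        = acc ++ ts.map (fun t => (ts.foldl (pvBReg fk) d).getD t unk) := by
  intro ts
  induction ts with
  | nil => intro d acc; simp
  | cons t ts ih =>
    intro d acc
    simp only [List.foldl_cons, List.map_cons]
    have hstep : pvAStep fk unk (d, acc) t
        = (pvBReg fk d t, acc ++ [(pvBReg fk d t).getD t unk]) := by
      unfold pvAStep pvBReg
      rfl
    rw [hstep, ih]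
    have hhead : (ts.foldl (pvBReg fk) (pvBReg fk d t)).getD t unk
        = (pvBReg fk d t).getD t unk := by
      apply pvReg_getD_frozen
      by_cases hf : fk.contains t = true
      · left
        unfold pvBReg
        by_cases hd : d.contains t = true
        · simp [hd]
        · rw [if_pos (by simp [hd, (PySem.Set.contains_iff fk t).mp hf])]
          exact PySem.Dict.contains_insert_self _ _ _
      · right; exact eq_false_of_ne_true hf
    rw [hhead]
    simp

-- A's registration fold equals pvExtend over B's collected list (seen set = new list).
lemma pvReg_eq_extend (fk : PySem.Set String) (d : PySem.Dict String Int) :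
    ∀ (ts : List String) (acc : List String),
      ts.foldl (pvBReg fk) (pvExtend d acc)
        = pvExtend d ((ts.foldl (pvCollect fk d) (acc, acc)).1) := by
  intro ts
  induction ts with
  | nil => intro acc; rfl
  | cons t ts ih =>
    intro acc
    simp only [List.foldl_cons]
    have hcond : (fk.contains t && !((pvExtend d acc).contains t))
        = (fk.contains t && !(d.contains t) && !(PySem.Set.contains acc t)) := by
      rw [pvContains_extend]
      have : PySem.Set.contains acc t = acc.contains t := by
        simp [PySem.Set.contains_eq_listContains]
      rw [this]
      cases fk.contains t <;> cases d.contains t <;> cases acc.contains t <;> rfl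
    by_cases hc : (fk.contains t && !(d.contains t) && !(PySem.Set.contains acc t)) = true
    · have hreg : pvBReg fk (pvExtend d acc) t
          = pvExtend d (acc ++ [t]) := by
        unfold pvBReg
        rw [hcond, if_pos hc, pvExtend_append]
      have hcol : pvCollect fk d (acc, (acc : PySem.Set String)) t = (acc ++ [t], acc ++ [t]) := by
        unfold pvCollect
        rw [if_pos hc]
        have hnc : PySem.Set.contains acc t = false := by
          have := (Bool.and_eq_true _ _ |>.mp hc).2
          simpa using this
        have hta : t ∉ acc := by
          rw [PySem.Set.contains_eq_listContains] at hnc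
          simpa using hnc
        simp [PySem.Set.add, hta]
      rw [hreg, hcol, ih]
    · have hreg : pvBReg fk (pvExtend d acc) t = pvExtend d acc := by
        unfold pvBReg; rw [hcond, if_neg hc]
      have hcol : pvCollect fk d (acc, (acc : PySem.Set String)) t = (acc, acc) := by
        unfold pvCollect; rw [if_neg hc]
      rw [hreg, hcol, ih]

-- The collected list is fresh w.r.t. d and duplicate-free.
lemma pvCollect_invariant (fk : PySem.Set String) (d : PySem.Dict String Int) :
    ∀ (ts : List String) (acc : List String),
      acc.Nodup → (∀ x ∈ acc, d.contains x = false) →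
      ((ts.foldl (pvCollect fk d) (acc, acc)).1.Nodup ∧
       ∀ x ∈ (ts.foldl (pvCollect fk d) (acc, acc)).1, d.contains x = false) := by
  intro ts
  induction ts with
  | nil => intro acc h1 h2; exact ⟨h1, h2⟩
  | cons t ts ih =>
    intro acc h1 h2
    simp only [List.foldl_cons]
    by_cases hc : (fk.contains t && !(d.contains t) && !(PySem.Set.contains acc t)) = true
    · have h3 := Bool.and_eq_true _ _ |>.mp hc
      have hdt : d.contains t = false := by simpa using (Bool.and_eq_true _ _ |>.mp h3.1).2
      have hat : t ∉ acc := by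
        have := h3.2
        simp only [Bool.not_eq_true'] at this
        rw [PySem.Set.contains_eq_listContains] at this
        simpa using this
      have hcol : pvCollect fk d (acc, (acc : PySem.Set String)) t = (acc ++ [t], acc ++ [t]) := by
        unfold pvCollect
        rw [if_pos hc]
        have hnc : PySem.Set.contains acc t = false := by
          have := h3.2; simpa using this
        simp [PySem.Set.add, hat]
      rw [hcol]
      apply ih
      · simp only [List.nodup_append]
        refine ⟨h1, List.nodup_singleton t, ?_⟩
        intro a ha b hb
        rw [List.mem_singleton] at hb
        subst hb
        intro he; subst he; exact hat ha
      · intro x hx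
        rcases List.mem_append.mp hx with hx | hx
        · exact h2 x hx
        · simp only [List.mem_singleton] at hx; subst hx; exact hdt
    · have hcol : pvCollect fk d (acc, (acc : PySem.Set String)) t = (acc, acc) := by
        unfold pvCollect; rw [if_neg hc]
      rw [hcol]; exact ih acc h1 h2

-- Size of the extension: each fresh distinct insert adds one.
lemma pvSize_extend (d : PySem.Dict String Int) (acc : List String)
    (hn : acc.Nodup) (hf : ∀ x ∈ acc, d.contains x = false) :
    (pvExtend d acc).size = d.size + acc.length := by
  induction acc using List.reverseRecOn with
  | nil => simp [pvExtend_nil]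
  | append_singleton acc t ih =>
    have hn' : acc.Nodup := (List.nodup_append.mp hn).1
    have hf' : ∀ x ∈ acc, d.contains x = false := fun x hx => hf x (List.mem_append.mpr (Or.inl hx))
    have hta : t ∉ acc := by
      have := List.nodup_append.mp hn
      intro h
      exact this.2.2 t h t (List.mem_singleton.mpr rfl) rfl
    have hct : (pvExtend d acc).contains t = false := by
      rw [pvContains_extend]
      have h1 : d.contains t = false := hf t (List.mem_append.mpr (Or.inr (List.mem_singleton.mpr rfl)))
      have h2 : acc.contains t = false := by simpa using hta
      rw [h1, h2]; rfl
    rw [pvExtend_append, PySem.Dict.size_insert, hct, ih hn' hf']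
    simp [Nat.add_assoc]

-- pvExtend equals the enumerate-driven insert fold (arithmetic ids) on fresh distinct keys.
lemma pvExtend_eq_enum (d : PySem.Dict String Int) (acc : List String)
    (hn : acc.Nodup) (hf : ∀ x ∈ acc, d.contains x = false) :
    pvExtend d acc
      = (PySem.List.enumerate acc 0).foldl
          (fun e p => e.insert p.2 ((d.size : Int) + p.1)) d := by
  induction acc using List.reverseRecOn with
  | nil => rfl
  | append_singleton acc t ih =>
    have hn' : acc.Nodup := (List.nodup_append.mp hn).1
    have hf' : ∀ x ∈ acc, d.contains x = false := fun x hx => hf x (List.mem_append.mpr (Or.inl hx))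
    rw [pvExtend_append, PySem.List.enumerate_append, List.foldl_append,
        pvSize_extend d acc hn' hf', ih hn' hf']
    simp [PySem.List.enumerate]

-- get? through a fold of inserts from d factors through the same fold from empty.
lemma pvGet?_foldl_insert (ps : List (Int × String)) (f : Int × String → Int)
    (d : PySem.Dict String Int) (t : String) :
    (ps.foldl (fun e p => e.insert p.2 (f p)) d).get? t
      = ((ps.foldl (fun e p => e.insert p.2 (f p)) PySem.Dict.empty).get? t).or (d.get? t) := by
  induction ps using List.reverseRecOn with
  | nil => simp
  | append_singleton ps p ih =>
    rw [List.foldl_append, List.foldl_append]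
    simp only [List.foldl_cons, List.foldl_nil]
    rw [PySem.Dict.get?_insert, PySem.Dict.get?_insert]
    by_cases h : t = p.2
    · simp [h]
    · simp [h, ih]

-- Keys of the enumerate-driven injection fold are exactly acc.
lemma pvInj_contains (acc : List String) (base : Int) (t : String) :
    ((PySem.List.enumerate acc 0).foldl
        (fun e p => e.insert p.2 (base + p.1)) PySem.Dict.empty).contains t
      = acc.contains t := by
  induction acc using List.reverseRecOn with
  | nil => simp
  | append_singleton acc x ih =>
    rw [PySem.List.enumerate_append, List.foldl_append]
    simp only [PySem.List.enumerate, List.foldl_cons, List.foldl_nil]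
    rw [PySem.Dict.contains_insert]
    by_cases h : t = x
    · simp [h]
    · simp only [List.contains_append]
      have hbe : (t == x) = false := by simpa using h
      simp [hbe, ih]
      exact fun hx => absurd hx h

-- Split-lookup characterisation of the extended dict.
lemma pvExtend_getD (d : PySem.Dict String Int) (acc : List String) (unk : Int)
    (hn : acc.Nodup) (hf : ∀ x ∈ acc, d.contains x = false) (t : String) :
    (pvExtend d acc).getD t unk
      = if d.contains t then d.getD t unk
        else ((PySem.List.enumerate acc 0).foldl
            (fun e p => e.insert p.2 ((d.size : Int) + p.1)) PySem.Dict.empty).getD t unk := by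
  rw [pvExtend_eq_enum d acc hn hf]
  rw [PySem.Dict.getD_eq_get?_getD, PySem.Dict.getD_eq_get?_getD]
  rw [pvGet?_foldl_insert (PySem.List.enumerate acc 0) (fun p => (d.size : Int) + p.1) d t]
  by_cases hd : d.contains t = true
  · have hta : t ∉ acc := by
      intro h
      rw [hf t h] at hd
      exact Bool.false_ne_true hd
    have hinj : ((PySem.List.enumerate acc 0).foldl
        (fun e p => e.insert p.2 ((d.size : Int) + p.1)) PySem.Dict.empty).get? t = none := by
      rw [PySem.Dict.get?_eq_none_iff_contains, pvInj_contains]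
      simpa using hta
    simp [hd, hinj]
  · have hdn : d.get? t = none := by
      rw [PySem.Dict.get?_eq_none_iff_contains]
      simpa using hd
    rw [PySem.Dict.getD_eq_get?_getD]
    simp [hd, hdn]

-- ===== VERDICT (by name: the statement is the Claim_ definition above) =====
theorem tokens_to_ids_spec : Claim_equal_tokens_to_ids := by
  intro tokens vocab force_keep _ _
  unfold Spec_tokens_to_ids tokens_to_ids tokens_to_ids_alt
  set d := PySem.Dict.ofList vocab with hd
  set unk := d.getD "<UNK>" 0 with hunk
  set fk := PySem.Set.ofList (force_keep.getD []) with hfk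
  have h1 := pvLoop_eq fk unk tokens d []
  simp only [List.nil_append] at h1
  rw [h1]
  have h2 : tokens.foldl (pvBReg fk) d
      = pvExtend d ((tokens.foldl (pvCollect fk d) ([], ([] : PySem.Set String))).1) := by
    have := pvReg_eq_extend fk d tokens []
    simpa [pvExtend_nil] using this
  have hinv := pvCollect_invariant fk d tokens [] (List.nodup_nil) (by intro x hx; cases hx)
  apply List.map_congr_left
  intro t _
  rw [h2, pvExtend_getD d _ unk hinv.1 hinv.2 t]
  rfl
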